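-- pv_equiv track=rewrite | github.com/pkauppin/pykko | scripts/inflection/inflect_type_51.py | paste_congruent
-- ===== SOURCE A (Python) =====
-- def paste_congruent(tables: list):
--
-- 	keys = {key for infl in tables for key in infl.keys()}
-- 	for infl in tables:
-- 		keys = keys & set(infl.keys())
--
-- 	base = {key: [] for key in keys}
-- 	for key in keys:
-- 		combinations = ['']
-- 		for infl in tables:
-- 			combinations = [
-- 				f'{f1}%{f2}' if f1 and f2 else
-- 				f2 for f1 in combinations for f2 in infl[key]
-- 			]
-- 		base[key] = combinations
-- 	return base
-- ===== SOURCE B (Python) =====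
-- def _join(combo):
--     out = ''
--     for part in combo:
--         out = f'{out}%{part}' if out and part else part
--     return out
--
--
-- def _combos(lists):
--     # Cartesian product as lists, first list varying slowest (recursive, right-to-left).
--     if not lists:
--         return [[]]
--     rest = _combos(lists[1:])
--     return [[x] + tail for x in lists[0] for tail in rest]
--
--
-- def paste_congruent(tables: list):
--     if not tables:
--         return {}
--     keys = set(tables[0].keys())
--     for infl in tables[1:]:
--         keys &= infl.keys()
--     return {key: [_join(combo) for combo in _combos([infl[key] for infl in tables])]
--             for key in keys}
-- ===== Notes on version B (the rewrite author's own statement) =====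
-- stated objective: alternative
-- what changed: A grows one combinations list in place by re-flatMapping it through each table; B first intersects the key sets starting from the first table, then builds all product tuples with a recursive Cartesian product and fold-joins each tuple separately.
import Mathlib
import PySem

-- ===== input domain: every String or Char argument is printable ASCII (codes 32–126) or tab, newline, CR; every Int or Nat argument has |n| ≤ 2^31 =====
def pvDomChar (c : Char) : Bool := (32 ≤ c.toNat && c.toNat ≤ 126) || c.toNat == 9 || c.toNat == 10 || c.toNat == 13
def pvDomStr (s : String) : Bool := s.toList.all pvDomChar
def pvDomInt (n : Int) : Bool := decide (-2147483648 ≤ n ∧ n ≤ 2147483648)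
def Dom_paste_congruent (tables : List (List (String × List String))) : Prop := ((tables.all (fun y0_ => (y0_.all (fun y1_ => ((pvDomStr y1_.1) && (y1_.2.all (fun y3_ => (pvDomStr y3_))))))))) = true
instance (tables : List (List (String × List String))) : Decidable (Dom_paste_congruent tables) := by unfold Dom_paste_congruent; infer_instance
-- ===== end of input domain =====

-- B rewrites A's incremental growing-list accumulation as a recursive Cartesian product followed by
-- a per-tuple fold-join (alternative decomposition, same cost; the returned dict is compared as a dict).

-- ===== PORT A =====
-- the f-string step  f'{f1}%{f2}' if f1 and f2 else f2  (written identically in both Pythons)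
def pvJoin (f1 f2 : String) : String := if f1 ≠ "" ∧ f2 ≠ "" then f1 ++ "%" ++ f2 else f2

def paste_congruent (tables : List (List (String × List String))) : List (String × List String) :=
  -- keys = {key for infl in tables for key in infl.keys()}
  let keys0 : PySem.Set String :=
    PySem.Set.ofList (tables.flatMap (fun infl => (PySem.Dict.mk infl).keys))
  -- for infl in tables: keys = keys & set(infl.keys())
  let keys : PySem.Set String :=
    tables.foldl (fun ks infl => PySem.Set.inter ks (PySem.Set.ofList (PySem.Dict.mk infl).keys)) keys0
  -- base = {key: [] for key in keys}  (the returned dict is compared ignoring key order)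
  let base : PySem.Dict String (List String) :=
    keys.foldl (fun d key => d.insert key []) PySem.Dict.empty
  -- for key in keys: combinations loop; base[key] = combinations
  let base :=
    keys.foldl (fun d key =>
      d.insert key
        (tables.foldl (fun combinations infl =>
          combinations.flatMap (fun f1 =>
            ((PySem.Dict.mk infl).getD key []).map (fun f2 => pvJoin f1 f2))) [""])) base
  base.items

-- ===== PORT B =====
-- _combos(lists): recursive Cartesian product, first list varying slowest
def pvCombos : List (List String) → List (List String)
  | [] => [[]]
  | l :: ls =>
    let rest := pvCombos ls
    l.flatMap (fun x => rest.map (fun tail => x :: tail))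

-- _join(combo): left fold of the f-string step over one tuple
def pvJoinAll (combo : List String) : String := combo.foldl pvJoin ""

def paste_congruent_alt (tables : List (List (String × List String))) : List (String × List String) :=
  match tables with
  | [] => []   -- if not tables: return {}
  | t0 :: rest =>
    -- keys = set(tables[0].keys()); for infl in tables[1:]: keys &= infl.keys()
    let keys : PySem.Set String :=
      rest.foldl (fun ks infl => PySem.Set.inter ks (PySem.Set.ofList (PySem.Dict.mk infl).keys))
        (PySem.Set.ofList (PySem.Dict.mk t0).keys)
    -- {key: [_join(combo) for combo in _combos([infl[key] for infl in tables])] for key in keys}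
    (keys.foldl (fun d key =>
        d.insert key
          ((pvCombos ((t0 :: rest).map (fun infl => (PySem.Dict.mk infl).getD key []))).map pvJoinAll))
      PySem.Dict.empty).items


-- ===== PRECONDITION & SPEC =====
def Spec_paste_congruent (tables : List (List (String × List String))) (out : List (String × List String)) : Prop := out = paste_congruent_alt tables
instance (tables : List (List (String × List String))) (out : List (String × List String)) : Decidable (Spec_paste_congruent tables out) := by unfold Spec_paste_congruent; infer_instance

-- ===== CLAIM (what is proved, stated in full; the proofs are below) =====
def Claim_equal_paste_congruent : Prop := ∀ (tables : List (List (String × List String))), Dom_paste_congruent tables → Spec_paste_congruent tables (paste_congruent tables)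

-- ===== LEMMAS AND PROOFS =====

lemma pv_filter_update (s : List String) :
    ∀ (ys s' : List String), (∀ x ∈ s, x ∈ s') →
      List.filter (fun x => PySem.Set.contains s x) (PySem.Set.update s' ys)
        = List.filter (fun x => PySem.Set.contains s x) s' := by
  intro ys
  induction ys with
  | nil => intro s' h; simp [PySem.Set.update]
  | cons y ys ih =>
    intro s' h
    have hs : PySem.Set.update s' (y :: ys) = PySem.Set.update (PySem.Set.add s' y) ys := by
      simp [PySem.Set.update]
    rw [hs, ih (PySem.Set.add s' y) (fun x hx => by
      rw [PySem.Set.mem_add]; exact Or.inl (h x hx))]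
    unfold PySem.Set.add
    split_ifs with hc
    · rfl
    · have hys' : y ∉ s' := by simpa using hc
      simp only [List.filter_append]
      have : List.filter (fun x => PySem.Set.contains s x) [y] = [] := by
        simp only [List.filter_cons, List.filter_nil]
        simp only [PySem.Set.contains_eq_listContains, List.contains_eq_mem,
          decide_eq_true_eq, ite_eq_right_iff]
        intro hy
        exact False.elim (hys' (h y hy))
      rw [this, List.append_nil]

lemma pv_keys_inter (xs ys : List String) :
    PySem.Set.inter (PySem.Set.ofList (xs ++ ys)) (PySem.Set.ofList xs)
      = PySem.Set.ofList xs := by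
  have h1 : PySem.Set.ofList (xs ++ ys) = PySem.Set.update (PySem.Set.ofList xs) ys := by
    simp [PySem.Set.ofList, PySem.Set.update, List.foldl_append]
  rw [PySem.Set.inter, h1]
  rw [pv_filter_update (PySem.Set.ofList xs) ys (PySem.Set.ofList xs) (fun x hx => hx)]
  apply List.filter_eq_self.mpr
  intro a ha
  exact (PySem.Set.contains_iff _ a).mpr ha

lemma pv_nodup_fold (rest : List (List (String × List String))) :
    ∀ (s : List String), s.Nodup →
      (rest.foldl (fun ks infl => PySem.Set.inter ks (PySem.Set.ofList (PySem.Dict.mk infl).keys)) s).Nodup := by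
  induction rest with
  | nil => intro s h; simpa using h
  | cons t rest ih =>
    intro s h
    simp only [List.foldl_cons]
    exact ih _ (PySem.Set.nodup_inter _ _ h)

lemma pv_combo (tabs : List (List (String × List String))) (getv : List (String × List String) → List String) :
    ∀ (acc : List String),
      tabs.foldl (fun combinations infl =>
          combinations.flatMap (fun f1 => (getv infl).map (fun f2 => pvJoin f1 f2))) acc
        = acc.flatMap (fun a => (pvCombos (tabs.map getv)).map (fun c => c.foldl pvJoin a)) := by
  induction tabs with
  | nil => intro acc; simp [pvCombos]
  | cons l ls ih =>
    intro acc
    rw [List.foldl_cons, ih]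
    simp [pvCombos, List.flatMap_assoc, List.flatMap_map, List.map_flatMap, Function.comp_def, List.foldl_cons]

lemma pv_overwrite (g : String → List String) :
    ∀ (ks : List String) (d : PySem.Dict String (List String)),
      (∀ k ∈ ks, d.contains k = true) →
      (ks.foldl (fun d k => d.insert k (g k)) d).items
        = d.items.map (fun p => if p.1 ∈ ks then (p.1, g p.1) else p) := by
  intro ks
  induction ks with
  | nil => intro d h; simp
  | cons k ks ih =>
    intro d h
    rw [List.foldl_cons]
    rw [ih (d.insert k (g k)) (fun k' hk' => by
      rw [PySem.Dict.contains_insert]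
      simp [h k' (List.mem_cons_of_mem _ hk')])]
    rw [PySem.Dict.items_insert_of_contains d (g k) (h k (List.mem_cons_self ..))]
    rw [List.map_map]
    apply List.map_congr_left
    intro p _
    by_cases hp : p.1 = k
    · simp [Function.comp, hp]
    · simp [Function.comp, hp]

lemma pv_main (tables : List (List (String × List String))) :
    paste_congruent tables = paste_congruent_alt tables := by
  cases tables with
  | nil => rfl
  | cons t0 rest =>
    unfold paste_congruent paste_congruent_alt
    simp only []
    -- keys agree
    have hkeys :
        (t0 :: rest).foldl (fun ks infl => PySem.Set.inter ks (PySem.Set.ofList (PySem.Dict.mk infl).keys))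
            (PySem.Set.ofList ((t0 :: rest).flatMap (fun infl => (PySem.Dict.mk infl).keys)))
          = rest.foldl (fun ks infl => PySem.Set.inter ks (PySem.Set.ofList (PySem.Dict.mk infl).keys))
              (PySem.Set.ofList (PySem.Dict.mk t0).keys) := by
      rw [List.foldl_cons, List.flatMap_cons, pv_keys_inter]
    rw [hkeys]
    set ks := rest.foldl (fun ks infl => PySem.Set.inter ks (PySem.Set.ofList (PySem.Dict.mk infl).keys))
        (PySem.Set.ofList (PySem.Dict.mk t0).keys) with hks
    have hnd : ks.Nodup := pv_nodup_fold rest _ (PySem.Set.nodup_ofList _)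
    -- value functions
    set gA : String → List String := fun key =>
      (t0 :: rest).foldl (fun combinations infl =>
        combinations.flatMap (fun f1 =>
          ((PySem.Dict.mk infl).getD key []).map (fun f2 => pvJoin f1 f2))) [""] with hgA
    set gB : String → List String := fun key =>
      (pvCombos ((t0 :: rest).map (fun infl => (PySem.Dict.mk infl).getD key []))).map pvJoinAll with hgB
    have hg : ∀ key, gA key = gB key := by
      intro key
      rw [hgA, hgB]
      simp only []
      rw [pv_combo (t0 :: rest) (fun infl => (PySem.Dict.mk infl).getD key [])]
      simp [pvJoinAll]
    -- base dict with []
    have hbase : (ks.foldl (fun d key => d.insert key []) PySem.Dict.empty).items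
        = ks.map (fun k => (k, ([] : List String))) := by
      have := PySem.Dict.items_foldl_insert_fresh ks (fun a => a) (fun _ => ([] : List String))
        PySem.Dict.empty (fun a _ => PySem.Dict.contains_empty a) (by simpa using hnd)
      simpa using this
    -- A's overwrite pass
    have hcont : ∀ k ∈ ks, (ks.foldl (fun (d : PySem.Dict String (List String)) key => d.insert key []) PySem.Dict.empty).contains k = true := by
      intro k hk
      rw [PySem.Dict.contains_iff_mem_keys]
      simp [PySem.Dict.keys, hbase, hk]
    rw [pv_overwrite gA ks _ hcont, hbase, List.map_map]
    -- B's build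
    have hB := PySem.Dict.items_foldl_insert_fresh ks (fun a => a) gB
      PySem.Dict.empty (fun a _ => PySem.Dict.contains_empty a) (by simpa using hnd)
    rw [hB]
    apply List.map_congr_left
    intro k hk
    simp [Function.comp, hk, hg k]

-- ===== VERDICT (by name: the statement is the Claim_ definition above) =====
theorem paste_congruent_spec : Claim_equal_paste_congruent := by
  intro tables _
  unfold Spec_paste_congruent
  exact pv_main tables
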